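-- pv_equiv track=rewrite | github.com/DMT4000/mini_chat | src/agent/advanced_fact_manager.py | track_fact_relationships
-- ===== SOURCE A (Python) =====
-- from typing import Dict, Any, List, Tuple
--
-- def track_fact_relationships(facts: Dict[str, Any]) -> Dict[str, List[str]]:
--     """
--     Track relationships between facts for better context understanding.
--
--     Args:
--         facts: Dictionary of user facts
--
--     Returns:
--         Dictionary mapping fact keys to related fact keys
--     """
--     relationships = {}
--
--     # Define common fact relationships
--     business_related = ['business_type', 'industry', 'stage', 'state', 'employees']
--     contact_related = ['name', 'email', 'phone', 'address']
--     preference_related = ['communication_style', 'detail_level', 'meeting_preference']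
--
--     relationship_groups = [business_related, contact_related, preference_related]
--
--     for fact_key in facts.keys():
--         relationships[fact_key] = []
--
--         # Find related facts in the same group
--         for group in relationship_groups:
--             if fact_key in group:
--                 relationships[fact_key] = [k for k in group if k in facts and k != fact_key]
--                 break
--
--     return relationships
-- ===== SOURCE B (Python) =====
-- def track_fact_relationships(facts):
--     """Per-group decomposition: compute each group's present members once,
--     then distribute the related lists; keys in no group keep an empty list."""
--     relationships = {key: [] for key in facts}
--
--     groups = [
--         ['business_type', 'industry', 'stage', 'state', 'employees'],
--         ['name', 'email', 'phone', 'address'],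
--         ['communication_style', 'detail_level', 'meeting_preference'],
--     ]
--
--     for group in groups:
--         present = [k for k in group if k in facts]
--         for k in present:
--             relationships[k] = [o for o in present if o != k]
--
--     return relationships
-- ===== Notes on version B (the rewrite author's own statement) =====
-- stated objective: alternative
-- what changed: Flips the traversal: instead of scanning all three groups for every fact key, B initializes every key's entry once and then loops over each fixed group a single time, computing its present members and distributing the related lists to them.
import Mathlib
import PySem

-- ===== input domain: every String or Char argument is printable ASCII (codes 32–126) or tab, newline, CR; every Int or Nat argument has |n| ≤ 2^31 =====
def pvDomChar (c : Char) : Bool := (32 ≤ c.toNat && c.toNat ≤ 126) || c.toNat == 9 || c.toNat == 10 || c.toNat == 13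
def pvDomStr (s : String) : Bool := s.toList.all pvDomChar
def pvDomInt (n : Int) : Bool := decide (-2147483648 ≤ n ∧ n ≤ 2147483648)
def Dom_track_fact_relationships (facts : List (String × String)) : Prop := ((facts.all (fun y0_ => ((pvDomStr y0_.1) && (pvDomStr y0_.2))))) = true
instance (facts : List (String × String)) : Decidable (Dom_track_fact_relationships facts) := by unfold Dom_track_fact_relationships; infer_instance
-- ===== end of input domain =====

-- B builds the same relationships per-group (compute each group's present members once,
-- then distribute) instead of A's per-key scan over the groups; same result, different decomposition.

-- the three fixed relationship groups (shared literal data of both programs)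
def pvG1 : List String := ["business_type", "industry", "stage", "state", "employees"]
def pvG2 : List String := ["name", "email", "phone", "address"]
def pvG3 : List String := ["communication_style", "detail_level", "meeting_preference"]
def pvGroups : List (List String) := [pvG1, pvG2, pvG3]

-- ===== PORT A =====
-- inner 'for group in relationship_groups: … break' loop of A
def pvFindGroupA (d : PySem.Dict String String) (k : String) :
    List (List String) → PySem.Dict String (List String) → PySem.Dict String (List String)
  | [], r => r
  | g :: gs, r =>
    if g.contains k then r.insert k (g.filter (fun x => d.contains x && !(x == k)))
    else pvFindGroupA d k gs r

def track_fact_relationships (facts : List (String × String)) : List (String × List String) :=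
  let d := PySem.Dict.ofList facts
  let rel := d.keys.foldl (fun r k => pvFindGroupA d k pvGroups (r.insert k [])) PySem.Dict.empty
  rel.items

-- ===== PORT B =====
def track_fact_relationships_alt (facts : List (String × String)) : List (String × List String) :=
  let d := PySem.Dict.ofList facts
  let rel0 := d.keys.foldl (fun r k => r.insert k ([] : List String)) PySem.Dict.empty
  let rel := pvGroups.foldl (fun r g =>
      let present := g.filter (fun k => d.contains k)
      present.foldl (fun r k => r.insert k (present.filter (fun o => !(o == k)))) r) rel0
  rel.items

-- ===== PRECONDITION & SPEC =====
def Spec_track_fact_relationships (facts : List (String × String)) (out : List (String × List String)) : Prop := out = track_fact_relationships_alt facts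
instance (facts : List (String × String)) (out : List (String × List String)) : Decidable (Spec_track_fact_relationships facts out) := by unfold Spec_track_fact_relationships; infer_instance

-- ===== CLAIM (what is proved, stated in full; the proofs are below) =====
def Claim_equal_track_fact_relationships : Prop := ∀ (facts : List (String × String)), Dom_track_fact_relationships facts → Spec_track_fact_relationships facts (track_fact_relationships facts)

-- ===== LEMMAS AND PROOFS =====

-- the value A stores for key k: first group containing k, filtered
def pvFirstVal (d : PySem.Dict String String) (k : String) : List (List String) → List String
  | [] => []
  | g :: gs =>
    if g.contains k then g.filter (fun x => d.contains x && !(x == k))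
    else pvFirstVal d k gs

theorem pvFindGroupA_insert (d : PySem.Dict String String) (k : String)
    (gs : List (List String)) (r : PySem.Dict String (List String)) :
    pvFindGroupA d k gs (r.insert k []) = r.insert k (pvFirstVal d k gs) := by
  induction gs generalizing r with
  | nil => rfl
  | cons g gs ih =>
    simp only [pvFindGroupA, pvFirstVal]
    split
    · exact PySem.Dict.insert_insert_self r k [] _
    · exact ih r

theorem getD_foldl_insert_fun {ν : Type} (f : String → ν) (d0 : ν) (l : List String)
    (r : PySem.Dict String ν) (k : String) :
    (l.foldl (fun r x => r.insert x (f x)) r).getD k d0 =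
      if k ∈ l then f k else r.getD k d0 := by
  induction l generalizing r with
  | nil => simp
  | cons x xs ih =>
    simp only [List.foldl_cons, ih, List.mem_cons, PySem.Dict.getD_insert]
    by_cases hx : k ∈ xs <;> by_cases he : k = x <;> simp [hx, he]

theorem pv_d12 (k : String) (h1 : k ∈ pvG1) (h2 : k ∈ pvG2) : False := by
  fin_cases h1 <;> simp_all [pvG2]
theorem pv_d13 (k : String) (h1 : k ∈ pvG1) (h2 : k ∈ pvG3) : False := by
  fin_cases h1 <;> simp_all [pvG3]
theorem pv_d23 (k : String) (h1 : k ∈ pvG2) (h2 : k ∈ pvG3) : False := by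
  fin_cases h1 <;> simp_all [pvG3]

-- one per-group pass of B preserves the key list when all present members already have keys
theorem pv_keys_step (d : PySem.Dict String String) (g : List String)
    (r : PySem.Dict String (List String))
    (hsub : ∀ x ∈ g.filter (fun k => d.contains k), x ∈ r.keys) :
    ((g.filter (fun k => d.contains k)).foldl
      (fun r k => r.insert k ((g.filter (fun k => d.contains k)).filter (fun o => !(o == k)))) r).keys
      = r.keys := by
  rw [PySem.Dict.keys_foldl_insert, PySem.Set.update_eq_append_filter]
  have h : (PySem.Set.ofList (g.filter (fun k => d.contains k))).filter
      (fun y => !(PySem.Set.contains r.keys y)) = [] := by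
    rw [List.filter_eq_nil_iff]
    intro a ha
    have ham : a ∈ g.filter (fun k => d.contains k) :=
      (PySem.Set.mem_ofList (xs := g.filter (fun k => d.contains k)) (y := a)).mp ha
    simpa using hsub a ham
  rw [h, List.append_nil]

theorem track_fact_relationships_spec' (facts : List (String × String)) :
    track_fact_relationships facts = track_fact_relationships_alt facts := by
  unfold track_fact_relationships track_fact_relationships_alt
  set d := PySem.Dict.ofList facts with hd
  have hnd : d.keys.Nodup := PySem.Dict.nodup_keys_ofList facts
  -- A's items
  have hstepA : (fun (r : PySem.Dict String (List String)) k =>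
      pvFindGroupA d k pvGroups (r.insert k [])) =
      (fun r k => r.insert k (pvFirstVal d k pvGroups)) := by
    funext r k; exact pvFindGroupA_insert d k pvGroups r
  have hA : (d.keys.foldl (fun r k => pvFindGroupA d k pvGroups (r.insert k []))
      PySem.Dict.empty).items = d.keys.map (fun k => (k, pvFirstVal d k pvGroups)) := by
    rw [hstepA]
    have := PySem.Dict.items_foldl_insert_fresh (l := d.keys) (k := fun x => x)
      (v := fun k => pvFirstVal d k pvGroups) (d := (PySem.Dict.empty : PySem.Dict String (List String)))
      (by intro a _; simp) (by simpa using hnd)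
    simpa using this
  -- B's base dict
  set rel0 := d.keys.foldl (fun r k => r.insert k ([] : List String)) PySem.Dict.empty with hrel0
  have h0items : rel0.items = d.keys.map (fun k => (k, ([] : List String))) := by
    have := PySem.Dict.items_foldl_insert_fresh (l := d.keys) (k := fun x => x)
      (v := fun _ => ([] : List String)) (d := (PySem.Dict.empty : PySem.Dict String (List String)))
      (by intro a _; simp) (by simpa using hnd)
    simpa using this
  have h0keys : rel0.keys = d.keys := by
    simp only [PySem.Dict.keys, h0items, List.map_map]; simp
  -- B's final dict, written as the three explicit group passes
  set step := fun (r : PySem.Dict String (List String)) (g : List String) =>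
      let present := g.filter (fun k => d.contains k)
      present.foldl (fun r k => r.insert k (present.filter (fun o => !(o == k)))) r with hstep
  have hfold : pvGroups.foldl step rel0 = step (step (step rel0 pvG1) pvG2) pvG3 := by
    simp [pvGroups]
  -- keys are preserved through each pass
  have hksub : ∀ (g : List String) (r : PySem.Dict String (List String)), r.keys = d.keys →
      (step r g).keys = d.keys := by
    intro g r hr
    have hs : ∀ x ∈ g.filter (fun k => d.contains k), x ∈ r.keys := by
      intro x hx
      rw [hr]
      exact (PySem.Dict.contains_iff_mem_keys _ _).mp (List.mem_filter.mp hx).2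
    exact (pv_keys_step d g r hs).trans hr
  have hk1 : (step rel0 pvG1).keys = d.keys := hksub _ _ h0keys
  have hk2 : (step (step rel0 pvG1) pvG2).keys = d.keys := hksub _ _ hk1
  have hk3 : (step (step (step rel0 pvG1) pvG2) pvG3).keys = d.keys := hksub _ _ hk2
  have hndB : (step (step (step rel0 pvG1) pvG2) pvG3).keys.Nodup := by rw [hk3]; exact hnd
  -- value of B's final dict at each key of d
  have hval : ∀ k ∈ d.keys,
      (step (step (step rel0 pvG1) pvG2) pvG3).getD k ([] : List String) = pvFirstVal d k pvGroups := by
    intro k hk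
    have hdk : d.contains k = true := (PySem.Dict.contains_iff_mem_keys _ _).mpr hk
    have h0 : rel0.getD k ([] : List String) = [] := by
      rw [hrel0, getD_foldl_insert_fun (f := fun _ => ([] : List String))]
      simp
    have hP : ∀ (g : List String) (r : PySem.Dict String (List String)),
        (step r g).getD k ([] : List String) =
          if k ∈ g.filter (fun k => d.contains k)
          then (g.filter (fun k => d.contains k)).filter (fun o => !(o == k))
          else r.getD k ([] : List String) := by
      intro g r
      exact getD_foldl_insert_fun
        (f := fun x => (g.filter (fun k => d.contains k)).filter (fun o => !(o == x)))
        ([] : List String) (g.filter (fun k => d.contains k)) r k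
    rw [hP, hP, hP, h0]
    simp only [List.mem_filter, hdk, and_true]
    simp only [pvGroups, pvFirstVal, List.contains_iff_mem]
    by_cases h1 : k ∈ pvG1 <;> by_cases h2 : k ∈ pvG2 <;> by_cases h3 : k ∈ pvG3
    · exact absurd h2 (fun h2 => pv_d12 k h1 h2)
    · exact absurd h2 (fun h2 => pv_d12 k h1 h2)
    · exact absurd h3 (fun h3 => pv_d13 k h1 h3)
    · simp only [h1, h2, h3, List.filter_filter, if_true, if_false]
      exact List.filter_congr (fun x _ => Bool.and_comm _ _)
    · exact absurd h3 (fun h3 => pv_d23 k h2 h3)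
    · simp only [h1, h2, h3, List.filter_filter, if_true, if_false]
      exact List.filter_congr (fun x _ => Bool.and_comm _ _)
    · simp only [h1, h2, h3, List.filter_filter, if_true, if_false]
      exact List.filter_congr (fun x _ => Bool.and_comm _ _)
    · simp [h1, h2, h3]
  -- put it together
  show (d.keys.foldl (fun r k => pvFindGroupA d k pvGroups (r.insert k [])) PySem.Dict.empty).items
      = (pvGroups.foldl step rel0).items
  rw [hA, hfold]
  rw [PySem.Dict.items_eq_map_keys _ hndB ([] : List String), hk3]
  exact (List.map_congr_left (fun k hk => by rw [hval k hk])).symm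

-- ===== VERDICT (by name: the statement is the Claim_ definition above) =====
theorem track_fact_relationships_spec : Claim_equal_track_fact_relationships := by
  intro facts _
  exact track_fact_relationships_spec' facts
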